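-- pv_equiv track=rewrite | github.com/wannli/un-docs-downloader | src/mandate_pipeline/igov.py | decision_in_series
-- ===== SOURCE A (Python) =====
-- def decision_in_series(number: int | None, series_starts: list[int]) -> bool:
--     """Return True if decision number is within configured series ranges."""
--     if number is None:
--         return False
--     if not series_starts:
--         return True
--
--     starts = sorted(series_starts)
--     for index, start in enumerate(starts):
--         next_start = starts[index + 1] if index + 1 < len(starts) else None
--         if number >= start and (next_start is None or number < next_start):
--             return True
--     return False
-- ===== SOURCE B (Python) =====
-- def decision_in_series(number, series_starts):
--     """Return True if decision number is within configured series ranges."""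
--     if number is None:
--         return False
--     return not series_starts or number >= min(series_starts)
-- ===== Notes on version B (the rewrite author's own statement) =====
-- stated objective: faster
-- what changed: The consecutive intervals of the sorted starts cover exactly [min(starts), inf), so the sort and the interval scan are replaced by a single min() pass and one comparison.
import Mathlib
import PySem

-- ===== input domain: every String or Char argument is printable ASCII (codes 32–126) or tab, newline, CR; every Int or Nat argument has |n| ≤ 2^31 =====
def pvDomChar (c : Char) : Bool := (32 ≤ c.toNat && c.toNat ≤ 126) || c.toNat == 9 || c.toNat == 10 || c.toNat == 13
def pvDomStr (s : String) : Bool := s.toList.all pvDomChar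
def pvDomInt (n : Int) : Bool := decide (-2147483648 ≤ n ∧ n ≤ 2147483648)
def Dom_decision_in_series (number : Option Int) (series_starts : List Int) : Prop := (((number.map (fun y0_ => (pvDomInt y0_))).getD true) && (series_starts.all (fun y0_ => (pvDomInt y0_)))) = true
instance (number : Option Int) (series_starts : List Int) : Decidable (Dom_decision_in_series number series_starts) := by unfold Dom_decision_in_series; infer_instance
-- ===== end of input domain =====

-- B replaces A's sort + scan over consecutive intervals by a single min() pass and one comparison
-- (the sorted intervals cover exactly [min(starts), ∞)).

-- ===== PORT A =====
-- the for-loop over the sorted list: at each position compares number with the current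
-- start and the next start (None when past the end), returning True on the first hit
def pvALoop (n : Int) : List Int → Bool
  | [] => false
  | [s] => decide (n ≥ s)
  | s :: s' :: rest => if n ≥ s ∧ n < s' then true else pvALoop n (s' :: rest)

def decision_in_series (number : Option Int) (series_starts : List Int) : Bool :=
  match number with
  | none => false
  | some n =>
    if series_starts = [] then true
    else pvALoop n (PySem.List.sorted series_starts (fun x => x) false)

-- ===== PORT B =====
def decision_in_series_alt (number : Option Int) (series_starts : List Int) : Bool :=
  match number with
  | none => false
  | some n =>
    series_starts.isEmpty ||
      (match PySem.List.min? series_starts (fun x => x) with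
       | none => false
       | some m => decide (n ≥ m))

-- ===== PRECONDITION & SPEC =====
def Spec_decision_in_series (number : Option Int) (series_starts : List Int) (out : Bool) : Prop := out = decision_in_series_alt number series_starts
instance (number : Option Int) (series_starts : List Int) (out : Bool) : Decidable (Spec_decision_in_series number series_starts out) := by unfold Spec_decision_in_series; infer_instance

-- ===== CLAIM (what is proved, stated in full; the proofs are below) =====
def Claim_equal_decision_in_series : Prop := ∀ (number : Option Int) (series_starts : List Int), Dom_decision_in_series number series_starts → Spec_decision_in_series number series_starts (decision_in_series number series_starts)

-- ===== LEMMAS AND PROOFS =====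

-- On a ≤-sorted nonempty list the interval scan succeeds iff n is at least the head.
lemma pvALoop_pairwise (n h : Int) (t : List Int)
    (hp : (h :: t).Pairwise (· ≤ ·)) : pvALoop n (h :: t) = decide (n ≥ h) := by
  induction t generalizing h with
  | nil => rfl
  | cons s' r ih =>
    have hle : h ≤ s' := (List.pairwise_cons.mp hp).1 s' (by simp)
    have hp' : (s' :: r).Pairwise (· ≤ ·) := (List.pairwise_cons.mp hp).2
    rw [pvALoop, ih s' hp']
    by_cases hcase : n ≥ h ∧ n < s'
    · simp [hcase]
    · have : (n ≥ s') ↔ (n ≥ h) := by constructor <;> intro hx <;> omega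
      simp [hcase, this]

theorem decision_in_series_spec : Claim_equal_decision_in_series := by
  intro number series_starts _
  unfold Spec_decision_in_series decision_in_series decision_in_series_alt
  cases number with
  | none => rfl
  | some n =>
    by_cases hne : series_starts = []
    · subst hne; rfl
    · simp only [hne, if_false]
      obtain ⟨m, hm⟩ : ∃ m, PySem.List.min? series_starts (fun x => x) = some m := by
        cases hmin : PySem.List.min? series_starts (fun x => x) with
        | none => exact absurd ((PySem.List.min?_eq_none_iff series_starts (fun x => x)).mp hmin) hne
        | some m => exact ⟨m, rfl⟩
      rw [hm]
      obtain ⟨h, t, hst⟩ : ∃ h t, PySem.List.sorted series_starts (fun x => x) false = h :: t := by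
        cases hs : PySem.List.sorted series_starts (fun x => x) false with
        | nil => exact absurd ((PySem.List.sorted_eq_nil_iff series_starts (fun x => x) false).mp hs) hne
        | cons h t => exact ⟨h, t, rfl⟩
      have hpw : (h :: t).Pairwise (· ≤ ·) := by
        have := PySem.List.sorted_pairwise series_starts (fun x => x)
        rwa [hst] at this
      rw [hst, pvALoop_pairwise n h t hpw]
      -- head of the sorted list equals the minimum value
      have hhm : h = m := by
        have hmem_h : h ∈ series_starts := by
          have := PySem.List.mem_sorted (xs := series_starts) (key := fun x => x)
            (rev := false) (x := h)
          rw [hst] at this; exact this.mp (by simp)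
        have h1 : m ≤ h := PySem.List.min?_isMin hm h hmem_h
        have h2 : h ≤ m := PySem.List.key_head_sorted_le series_starts (fun x => x) hst m (PySem.List.min?_mem hm)
        omega
      rw [hhm]
      simp [hne]
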